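-- pv_equiv track=rewrite | github.com/MendozaLab/erdos-experiments | Erdos30/exp_gc02_tracy_widom.py | get_singer_set
-- ===== SOURCE A (Python) =====
-- PRIMITIVE_POLYS = {
--      2: [1, 0, 1],
--      3: [1, 0, 2],
--      5: [2, 0, 1],
--      7: [2, 1, 1],
--     11: [3, 0, 1],
--     13: [2, 0, 1],
--     17: [3, 0, 2],
--     19: [4, 0, 4],
--     23: [2, 0, 2],
--     29: [2, 0, 3],
--     31: [7, 0, 6],
--     37: [2, 0, 3],
--     41: [6, 0, 2],
--     43: [9, 0, 1],
--     47: [2, 0, 1],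
-- }
--
-- def gf3_mul(u, v, q, red):
--     """
--     Multiply u, v in GF(q^3).
--     Elements: [c0, c1, c2] = c0 + c1*x + c2*x^2.
--     Reduction rule: x^3 = red[0] + red[1]*x + red[2]*x^2.
--     """
--     w = [0] * 5
--     for i in range(3):
--         for j in range(3):
--             w[i + j] = (w[i + j] + u[i] * v[j]) % q
--     r0, r1, r2 = red
--     # x^4 = x * x^3 = r0*x + r1*x^2 + r2*(r0+r1*x+r2*x^2)
--     x4 = [(r2 * r0) % q, (r0 + r2 * r1) % q, (r1 + r2 * r2) % q]
--     for i in range(3):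
--         w[i] = (w[i] + w[4] * x4[i] + w[3] * red[i]) % q
--     return [w[0], w[1], w[2]]
--
-- def get_singer_set(q):
--     """
--     Construct Singer difference set in Z_N, N = q^2+q+1, using GF(q^3)*.
--     Returns sorted list of q+1 elements forming a (N, q+1, 1) difference set.
--
--     Construction: g = x is a primitive element of GF(q^3)* (primitive polynomial).
--     Build full power table g^0, ..., g^(q^3-2). Group elements into N cosets of GF(q)*
--     (each coset = a projective point in PG(2,q)). Singer set = the q+1 cosets whose
--     "projective representative" lies on a coordinate hyperplane (c_j = 0 for some j).
--     """
--     if q not in PRIMITIVE_POLYS: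
--         return None
--
--     poly = PRIMITIVE_POLYS[q]
--     a0, a1, a2 = poly
--     red = [(-a0) % q, (-a1) % q, (-a2) % q]
--     order = q ** 3 - 1
--     N = q * q + q + 1
--
--     # Build exp_to_elem table
--     exp_to_elem = {}
--     current = [1, 0, 0]
--     g = [0, 1, 0]
--     for t in range(order):
--         exp_to_elem[t] = current[:]
--         current = gf3_mul(current, g, q, red)
--     if current != [1, 0, 0]:
--         return None   # Not primitive — shouldn't happen
--
--     # Try each coordinate hyperplane c_j = 0
--     for coord in range(3):
--         singer = []
--         for r in range(N):
--             for j in range(q - 1):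
--                 t = r + j * N
--                 if t < order and exp_to_elem[t][coord] == 0:
--                     singer.append(r)
--                     break
--         if len(singer) == q + 1:
--             return sorted(singer)
--     return None
-- ===== SOURCE B (Python) =====
-- # B: same table build; selection phase is ONE indexed pass over t building all three
-- # candidate hyperplane sets at once, instead of three nested coord/r/j rescans.
-- PRIMITIVE_POLYS = {
--      2: [1, 0, 1],
--      3: [1, 0, 2],
--      5: [2, 0, 1],
--      7: [2, 1, 1],
--     11: [3, 0, 1],
--     13: [2, 0, 1],
--     17: [3, 0, 2],
--     19: [4, 0, 4],
--     23: [2, 0, 2],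
--     29: [2, 0, 3],
--     31: [7, 0, 6],
--     37: [2, 0, 3],
--     41: [6, 0, 2],
--     43: [9, 0, 1],
--     47: [2, 0, 1],
-- }
--
-- def gf3_mul(u, v, q, red):
--     w = [0] * 5
--     for i in range(3):
--         for j in range(3):
--             w[i + j] = (w[i + j] + u[i] * v[j]) % q
--     r0, r1, r2 = red
--     x4 = [(r2 * r0) % q, (r0 + r2 * r1) % q, (r1 + r2 * r2) % q]
--     for i in range(3):
--         w[i] = (w[i] + w[4] * x4[i] + w[3] * red[i]) % q
--     return [w[0], w[1], w[2]]
--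
-- def get_singer_set(q):
--     if q not in PRIMITIVE_POLYS:
--         return None
--
--     poly = PRIMITIVE_POLYS[q]
--     a0, a1, a2 = poly
--     red = [(-a0) % q, (-a1) % q, (-a2) % q]
--     order = q ** 3 - 1
--     N = q * q + q + 1
--
--     exp_to_elem = {}
--     current = [1, 0, 0]
--     g = [0, 1, 0]
--     for t in range(order):
--         exp_to_elem[t] = current[:]
--         current = gf3_mul(current, g, q, red)
--     if current != [1, 0, 0]:
--         return None
--
--     # Single pass: collect, per coordinate, the residues of the exponents whose
--     # element vanishes in that coordinate.
--     sets = [set(), set(), set()]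
--     for t in range(order):
--         r = t % N
--         e = exp_to_elem[t]
--         for coord in range(3):
--             if e[coord] == 0:
--                 sets[coord].add(r)
--     for coord in range(3):
--         if len(sets[coord]) == q + 1:
--             return sorted(sets[coord])
--     return None
-- ===== Notes on version B (the rewrite author's own statement) =====
-- stated objective: alternative
-- what changed: The selection phase is rebuilt as one indexed pass over the exponent table that buckets each exponent's residue t % N into the three coordinate-hyperplane sets at once, replacing A's three nested coord/r/j rescans of the table (with break) by a single loop plus per-coordinate size checks.
import Mathlib
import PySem

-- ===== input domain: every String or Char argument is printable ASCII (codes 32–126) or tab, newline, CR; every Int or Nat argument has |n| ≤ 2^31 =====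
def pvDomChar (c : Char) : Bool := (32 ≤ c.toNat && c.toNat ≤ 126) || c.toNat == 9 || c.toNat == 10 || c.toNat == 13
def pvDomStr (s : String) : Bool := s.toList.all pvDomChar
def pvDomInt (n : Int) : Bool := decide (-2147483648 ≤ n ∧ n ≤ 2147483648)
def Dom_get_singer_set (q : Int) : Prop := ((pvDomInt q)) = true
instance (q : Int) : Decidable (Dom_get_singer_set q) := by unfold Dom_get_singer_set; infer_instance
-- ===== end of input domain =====

-- B rebuilds the selection phase as one indexed pass over the exponent table, bucketing
-- residues into the three hyperplane sets at once instead of three nested coord/r/j rescans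
-- (objective: alternative decomposition, same asymptotic cost).

-- ===== PORT A =====

def PRIMITIVE_POLYS : PySem.Dict Int (List Int) :=
  PySem.Dict.mk [((2:Int), [1, 0, 1]), (3, [1, 0, 2]), (5, [2, 0, 1]), (7, [2, 1, 1]),
    (11, [3, 0, 1]), (13, [2, 0, 1]), (17, [3, 0, 2]), (19, [4, 0, 4]), (23, [2, 0, 2]),
    (29, [2, 0, 3]), (31, [7, 0, 6]), (37, [2, 0, 3]), (41, [6, 0, 2]), (43, [9, 0, 1]),
    (47, [2, 0, 1])]

-- gf3_mul, line for line: w is the 5-entry work list, mutated by index (pySetD/pyGetD are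
-- exact here: every index used is in range).
def gf3_mul (u v : List Int) (q : Int) (red : List Int) : List Int :=
  let w : List Int := [0, 0, 0, 0, 0]
  let w := (PySem.List.pyRange 0 3 1).foldl (fun w i =>
      (PySem.List.pyRange 0 3 1).foldl (fun w j =>
        PySem.List.pySetD w (i + j)
          (PySem.Int.mod (PySem.List.pyGetD w (i + j) 0 +
            PySem.List.pyGetD u i 0 * PySem.List.pyGetD v j 0) q)) w) w
  let r0 := PySem.List.pyGetD red 0 0
  let r1 := PySem.List.pyGetD red 1 0
  let r2 := PySem.List.pyGetD red 2 0
  let x4 : List Int := [PySem.Int.mod (r2 * r0) q, PySem.Int.mod (r0 + r2 * r1) q,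
    PySem.Int.mod (r1 + r2 * r2) q]
  let w := (PySem.List.pyRange 0 3 1).foldl (fun w i =>
      PySem.List.pySetD w i
        (PySem.Int.mod (PySem.List.pyGetD w i 0 +
          PySem.List.pyGetD w 4 0 * PySem.List.pyGetD x4 i 0 +
          PySem.List.pyGetD w 3 0 * PySem.List.pyGetD red i 0) q)) w
  [PySem.List.pyGetD w 0 0, PySem.List.pyGetD w 1 0, PySem.List.pyGetD w 2 0]

-- exp_to_elem[t][coord] == 0, total-ized with defaults; exact here: every t tested is a key
-- of the table (0 <= t < order) and every table entry is a 3-element list.  (Both Pythons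
-- contain this expression verbatim, so both ports use this helper.)
def coordZero (d : Array (List Int)) (t c : Int) : Bool :=
  PySem.List.pyGetD ((d[t.toNat]?).getD []) c 0 == 0

-- the power-table loop 'for t in range(order): exp_to_elem[t] = current[:]; current = gf3_mul(...)',
-- identical in both Pythons.  exp_to_elem's keys are exactly 0, 1, ..., order-1 in insertion
-- order, so the dict is ported, exactly, as the array of its values indexed by the key:
-- writing exp_to_elem[t] for the fresh key t appends (push), reading exp_to_elem[t] indexes.
def buildTable (q order : Int) (red : List Int) : Array (List Int) × List Int :=
  (PySem.List.pyRange 0 order 1).foldl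
    (fun (p : Array (List Int) × List Int) _t =>
      (p.1.push p.2, gf3_mul p.2 [0, 1, 0] q red))
    (#[], [1, 0, 0])

-- A's inner 'for r ...: for j ...: if ...: singer.append(r); break'  — the j-loop with
-- break is List.any (short-circuit search), the append loop is foldl-append.
def singerA (d : Array (List Int)) (q order N c : Int) : List Int :=
  (PySem.List.pyRange 0 N 1).foldl (fun acc r =>
    if (PySem.List.pyRange 0 (q - 1) 1).any (fun j =>
        decide (r + j * N < order) && coordZero d (r + j * N) c)
    then acc ++ [r] else acc) []

-- A's 'for coord in range(3): ... return sorted(singer) ... / return None'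
def coordLoopA (d : Array (List Int)) (q order N : Int) : List Int → Option (List Int)
  | [] => none
  | c :: cs =>
    let singer := singerA d q order N c
    if PySem.List.len singer == q + 1
    then some (PySem.List.sorted singer (fun x => x) false)
    else coordLoopA d q order N cs

def get_singer_set (q : Int) : Option (List Int) :=
  match PySem.Dict.get? PRIMITIVE_POLYS q with
  | none => none
  | some poly =>
    let a0 := PySem.List.pyGetD poly 0 0
    let a1 := PySem.List.pyGetD poly 1 0
    let a2 := PySem.List.pyGetD poly 2 0
    let red : List Int := [PySem.Int.mod (-a0) q, PySem.Int.mod (-a1) q, PySem.Int.mod (-a2) q]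
    let order := q ^ 3 - 1
    let N := q * q + q + 1
    let st := buildTable q order red
    if st.2 ≠ [1, 0, 0] then none
    else coordLoopA st.1 q order N [0, 1, 2]

-- ===== PORT B =====

def get_singer_set_alt (q : Int) : Option (List Int) :=
  match PySem.Dict.get? PRIMITIVE_POLYS q with
  | none => none
  | some poly =>
    let a0 := PySem.List.pyGetD poly 0 0
    let a1 := PySem.List.pyGetD poly 1 0
    let a2 := PySem.List.pyGetD poly 2 0
    let red : List Int := [PySem.Int.mod (-a0) q, PySem.Int.mod (-a1) q, PySem.Int.mod (-a2) q]
    let order := q ^ 3 - 1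
    let N := q * q + q + 1
    let st := buildTable q order red
    if st.2 ≠ [1, 0, 0] then none
    else
      -- single pass over t: r = t % N, bucket r into each coordinate set with e[coord] == 0
      let sets := (PySem.List.pyRange 0 order 1).foldl
        (fun (s : PySem.Set Int × PySem.Set Int × PySem.Set Int) t =>
          let r := PySem.Int.mod t N
          (if coordZero st.1 t 0 then PySem.Set.add s.1 r else s.1,
           if coordZero st.1 t 1 then PySem.Set.add s.2.1 r else s.2.1,
           if coordZero st.1 t 2 then PySem.Set.add s.2.2 r else s.2.2))
        (PySem.Set.empty, PySem.Set.empty, PySem.Set.empty)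
      if PySem.Set.len sets.1 == q + 1 then some (PySem.List.sorted sets.1 (fun x => x) false)
      else if PySem.Set.len sets.2.1 == q + 1 then some (PySem.List.sorted sets.2.1 (fun x => x) false)
      else if PySem.Set.len sets.2.2 == q + 1 then some (PySem.List.sorted sets.2.2 (fun x => x) false)
      else none

-- ===== PRECONDITION & SPEC =====
def Spec_get_singer_set (q : Int) (out : Option (List Int)) : Prop := out = get_singer_set_alt q
instance (q : Int) (out : Option (List Int)) : Decidable (Spec_get_singer_set q out) := by unfold Spec_get_singer_set; infer_instance

-- ===== CLAIM (what is proved, stated in full; the proofs are below) =====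
def Claim_equal_get_singer_set : Prop := ∀ (q : Int), Dom_get_singer_set q → Spec_get_singer_set q (get_singer_set q)

-- ===== LEMMAS AND PROOFS =====

-- B's one-pass set for a single coordinate
def singerB (d : Array (List Int)) (order N c : Int) (s : PySem.Set Int) : PySem.Set Int :=
  (PySem.List.pyRange 0 order 1).foldl
    (fun s t => if coordZero d t c then PySem.Set.add s (PySem.Int.mod t N) else s) s

theorem tripleElab (d : Array (List Int)) (N : Int) (ts : List Int)
    (s0 s1 s2 : PySem.Set Int) :
    ts.foldl (fun (s : PySem.Set Int × PySem.Set Int × PySem.Set Int) t =>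
      let r := PySem.Int.mod t N
      (if coordZero d t 0 then PySem.Set.add s.1 r else s.1,
       if coordZero d t 1 then PySem.Set.add s.2.1 r else s.2.1,
       if coordZero d t 2 then PySem.Set.add s.2.2 r else s.2.2)) (s0, s1, s2)
    = (ts.foldl (fun s t => if coordZero d t 0 then PySem.Set.add s (PySem.Int.mod t N) else s) s0,
       ts.foldl (fun s t => if coordZero d t 1 then PySem.Set.add s (PySem.Int.mod t N) else s) s1,
       ts.foldl (fun s t => if coordZero d t 2 then PySem.Set.add s (PySem.Int.mod t N) else s) s2) := by
  induction ts generalizing s0 s1 s2 with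
  | nil => rfl
  | cons t ts ih => simp only [List.foldl_cons]; rw [ih]

theorem singerB_eq_ofList (d : Array (List Int)) (order N c : Int) :
    singerB d order N c PySem.Set.empty
    = PySem.Set.ofList (((PySem.List.pyRange 0 order 1).filter
        (fun t => coordZero d t c)).map (fun t => PySem.Int.mod t N)) := by
  unfold singerB
  rw [PySem.List.foldl_if_eq_foldl_filter, ← PySem.Set.update_map_eq_foldl_add]
  exact PySem.Set.update_empty _

theorem singerA_eq_filter (d : Array (List Int)) (q order N c : Int) :
    singerA d q order N c
    = (PySem.List.pyRange 0 N 1).filter (fun r =>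
        (PySem.List.pyRange 0 (q - 1) 1).any (fun j =>
          decide (r + j * N < order) && coordZero d (r + j * N) c)) := by
  unfold singerA
  rw [PySem.List.foldl_append_if_eq_filter]
  simp

theorem singer_perm (d : Array (List Int)) (q N order c : Int) (hq : 2 ≤ q)
    (hN : N = q * q + q + 1) (ho : order = q ^ 3 - 1) :
    (singerA d q order N c).Perm (singerB d order N c PySem.Set.empty) := by
  have hq2 : (0:Int) ≤ q * q := mul_self_nonneg q
  have hNpos : 0 < N := by omega
  have key : order = (q - 1) * N := by rw [hN, ho]; ring
  rw [singerA_eq_filter, singerB_eq_ofList]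
  have hndA : (singerA d q order N c).Nodup := by
    rw [singerA_eq_filter]; exact (PySem.List.nodup_pyRange_one 0 N).filter _
  rw [singerA_eq_filter] at hndA
  rw [List.perm_ext_iff_of_nodup hndA (PySem.Set.nodup_ofList _)]
  intro x
  simp only [PySem.Set.mem_ofList, List.mem_map, List.mem_filter,
    PySem.List.mem_pyRange_one, List.any_eq_true, Bool.and_eq_true, decide_eq_true_eq]
  constructor
  · rintro ⟨⟨hx0, hxN⟩, j, ⟨hj0, hjq⟩, hlt, hz⟩
    exact ⟨x + j * N, ⟨⟨by positivity, hlt⟩, hz⟩, by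
      rw [PySem.Int.mod_eq_emod_of_pos hNpos, mul_comm, Int.add_mul_emod_self_left,
        Int.emod_eq_of_lt hx0 hxN]⟩
  · rintro ⟨t, ⟨⟨ht0, hto⟩, hz⟩, hx⟩
    rw [PySem.Int.mod_eq_emod_of_pos hNpos] at hx
    have hxmod : x = t % N := hx.symm
    have hj0 : 0 ≤ t / N := Int.ediv_nonneg ht0 hNpos.le
    have hjq : t / N < q - 1 := by
      rw [Int.ediv_lt_iff_lt_mul hNpos]; rw [key] at hto; exact hto
    have ht : x + (t / N) * N = t := by
      rw [hxmod, mul_comm]; exact Int.emod_add_mul_ediv t N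
    refine ⟨⟨by rw [hxmod]; exact Int.emod_nonneg t hNpos.ne',
             by rw [hxmod]; exact Int.emod_lt_of_pos t hNpos⟩,
            t / N, ⟨hj0, hjq⟩, by rw [ht]; exact hto, by rw [ht]; exact hz⟩

theorem q_ge_two {q : Int} {p : List Int} (h : PySem.Dict.get? PRIMITIVE_POLYS q = some p) :
    2 ≤ q := by
  have hk : q ∈ PySem.Dict.keys PRIMITIVE_POLYS := by
    by_contra hk
    rw [← PySem.Dict.get?_eq_none_iff_not_mem_keys] at hk
    rw [hk] at h
    cases h
  simp only [PRIMITIVE_POLYS, PySem.Dict.keys] at hk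
  norm_num at hk
  omega

theorem selection_eq (d : Array (List Int)) (q N order : Int) (hq : 2 ≤ q)
    (hN : N = q * q + q + 1) (ho : order = q ^ 3 - 1) :
    coordLoopA d q order N [0, 1, 2]
    = (if PySem.Set.len (singerB d order N 0 PySem.Set.empty) == q + 1 then
         some (PySem.List.sorted (singerB d order N 0 PySem.Set.empty) (fun x => x) false)
       else if PySem.Set.len (singerB d order N 1 PySem.Set.empty) == q + 1 then
         some (PySem.List.sorted (singerB d order N 1 PySem.Set.empty) (fun x => x) false)
       else if PySem.Set.len (singerB d order N 2 PySem.Set.empty) == q + 1 then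
         some (PySem.List.sorted (singerB d order N 2 PySem.Set.empty) (fun x => x) false)
       else none) := by
  have h0 := singer_perm d q N order 0 hq hN ho
  have h1 := singer_perm d q N order 1 hq hN ho
  have h2 := singer_perm d q N order 2 hq hN ho
  simp only [coordLoopA, PySem.List.len_eq, PySem.Set.len]
  rw [h0.length_eq, h1.length_eq, h2.length_eq,
    (PySem.List.sorted_id_eq_sorted_id_iff_perm _ _).mpr h0,
    (PySem.List.sorted_id_eq_sorted_id_iff_perm _ _).mpr h1,
    (PySem.List.sorted_id_eq_sorted_id_iff_perm _ _).mpr h2]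
  rfl

-- ===== VERDICT (by name: the statement is the Claim_ definition above) =====
theorem get_singer_set_spec : Claim_equal_get_singer_set := by
  intro q _
  unfold Spec_get_singer_set get_singer_set get_singer_set_alt
  cases hget : PySem.Dict.get? PRIMITIVE_POLYS q with
  | none => rfl
  | some poly =>
    have hq := q_ge_two hget
    simp only []
    split
    · rfl
    · rw [tripleElab]
      exact selection_eq _ q _ _ hq rfl rfl
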